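/-
  Test support for the stepper: the `Sem` term of a byte string as a TERM (`insn% [bytes]`), found by running the
  model's decoder (`Dec.findInsn`, X86/Derived/Dec/Find.lean), and the goal a stepping test states about it.
  Nothing here is used by a proof about a program: there the term comes with a `User.Decodes` fact.
-/
import UserX.Tac

namespace UserX
open Lean Meta Elab Term X86

/-- The mode of every machine of the user relation: 64-bit code, an Intel processor, every CPUID feature present. -/
def testMode : DecMode :=
  { in64 := true, defaultOperandBits := 32, defaultAddressBits := 64, vendor := .intel, has := fun _ => true }

/-- `insn% [b₀, b₁, …]`: the `Sem Unit` term the model's decoder finds for these bytes in 64-bit mode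
(`Sem.instr keep len body` for an ordinary row). -/
elab "insn% " bytes:term : term => do
  let bytesTy := mkApp (mkConst ``List [Level.zero]) (mkConst ``UInt8)
  let bytesE ← instantiateMVars (← elabTermEnsuringType bytes (some bytesTy))
  let bytesV ← unsafe evalExpr (List UInt8) bytesTy bytesE
  let some t ← X86.Dec.findInsn testMode bytesV | throwError "insn%: no row claims these bytes"
  unless t.len == bytesV.length do
    throwError "insn%: the instruction is the first {t.len} of the {bytesV.length} bytes"
  return t.term

/-- `u_timed tac`: run `tac` and report the milliseconds it took (test reports). -/
elab "u_timed " tac:tacticSeq : tactic => do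
  let t0 ← IO.monoMsNow
  Lean.Elab.Tactic.evalTactic tac
  let t1 ← IO.monoMsNow
  logInfo m!"u_timed: {t1 - t0} ms"

end UserX

namespace X86.User

/-- What a stepping test states: from every machine in the relation with `u`, the instruction term `s` runs without a
fault into a state satisfying `Q`. -/
def InsnGoal (L : Layout) (μ : Microarch) (u : State) (Q : State → Prop) (s : Sem Unit) : Prop :=
  ∀ m, Abs L m u → Sem.wpUser L μ s (fun _ u' => Q u') (fun _ _ => False) u

/-- The instruction-level rule for a test goal: RIP is advanced, the body runs. -/
theorem InsnGoal.of_body {L : Layout} {μ : Microarch} {u : State} {Q : State → Prop}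
    (keep : Machine → Machine → Machine) (len : Word) (body : Sem Unit)
    (h : ∀ m, Abs L m u → Sem.wpUser L μ body (fun _ u' => Q u') (fun _ _ => False) (u.setRip (u.rip + len))) :
    InsnGoal L μ u Q (Sem.instr keep len body) :=
  fun m hm => Sem.wpUser_instr_nofault L μ keep len body _ u (h m hm)

end X86.User

/-- `u_insn [facts]`: a test goal `InsnGoal L μ u Q (Sem.instr keep len body)`. -/
syntax "u_insn" " [" Lean.Parser.Tactic.simpLemma,* "]" : tactic
macro_rules
  | `(tactic| u_insn [$extra,*]) => `(tactic| (
    refine X86.User.InsnGoal.of_body _ _ _ ?_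
    u_body [$extra,*]))

namespace UserX
open Lean Meta Elab Tactic

/-- `u_expect_blocked ty [facts]`: run `u_insn [facts]` on a fresh goal of type `ty` and check that it does NOT get
through: some goal it leaves is still a `wpUser` (the instruction leaves the user subset, or needs a fact the layer does
not have) or is `False` with nothing to refute (the instruction faults). The attempt is thrown away. For the test
file's list of blocked forms. -/
elab "u_expect_blocked " ty:term:max " [" facts:Lean.Parser.Tactic.simpLemma,* "]" : tactic => do
  let saved ← saveState
  let blocked ← (do
    let tyE ← Lean.Elab.Tactic.elabTerm ty none
    let g ← mkFreshExprSyntheticOpaqueMVar tyE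
    setGoals [g.mvarId!]
    evalTactic (← `(tactic| u_insn [$facts,*]))
    let gs ← getUnsolvedGoals
    let mut found := false
    for g' in gs do
      let t := (← instantiateMVars (← g'.getType)).cleanupAnnotations
      if t.isAppOf ``X86.Sem.wpUser || t.isConstOf ``False then
        found := true
    pure found)
  saved.restore
  unless blocked do
    throwError "u_expect_blocked: the instruction stepped through"

end UserX
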